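-- pv_equiv track=rewrite | github.com/Ethan-Yang0101/Resume-BERT-NER-Project | project_label_studio/project_selector.py | recover_data
-- ===== SOURCE A (Python) =====
-- def recover_data(txt_list, tag_list):
--     '''将分解的列表还原为句子形式'''
--     tags_list, tags = [], []
--     for token, tag in zip(txt_list, tag_list):
--         if token == '[line]':
--             tags.append('O')
--             tags_list.append(tags)
--             tags = []
--             continue
--         tags.append(tag)
--     return tags_list
-- ===== SOURCE B (Python) =====
-- def recover_data(txt_list, tag_list):
--     '''将分解的列表还原为句子形式'''
--     n = min(len(txt_list), len(tag_list))
--     txt, tags = txt_list[:n], tag_list[:n]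
--     out = []
--     while '[line]' in txt:
--         b = txt.index('[line]')
--         out.append(tags[:b] + ['O'])
--         txt, tags = txt[b + 1:], tags[b + 1:]
--     return out
-- ===== Notes on version B (the rewrite author's own statement) =====
-- stated objective: alternative
-- what changed: Replaces the element-by-element scan with a running segment accumulator by a split-at-first-marker loop: truncate both lists to the common length, then repeatedly find the next '[line]' with .index and emit the tag slice before it plus 'O'.
import Mathlib
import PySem

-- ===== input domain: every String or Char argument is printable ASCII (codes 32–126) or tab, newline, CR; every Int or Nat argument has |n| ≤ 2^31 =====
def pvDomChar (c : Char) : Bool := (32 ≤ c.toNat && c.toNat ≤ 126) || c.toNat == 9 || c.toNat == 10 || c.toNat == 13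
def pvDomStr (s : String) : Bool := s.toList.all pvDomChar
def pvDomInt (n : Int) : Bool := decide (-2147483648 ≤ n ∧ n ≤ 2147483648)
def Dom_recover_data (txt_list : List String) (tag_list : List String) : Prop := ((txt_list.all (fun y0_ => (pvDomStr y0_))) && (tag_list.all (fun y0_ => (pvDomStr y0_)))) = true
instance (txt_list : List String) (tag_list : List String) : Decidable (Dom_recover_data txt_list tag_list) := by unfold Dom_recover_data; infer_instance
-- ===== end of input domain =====

-- B replaces A's element-by-element scan-and-accumulate by a split-at-first-marker loop
-- (truncate to the common length, then repeatedly .index the next '[line]' and slice);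
-- an alternative decomposition of the same cost. Return-value equivalence, no mutation involved.


-- ===== PORT A =====
-- literal port of A: fold over zip(txt_list, tag_list) with state (tags_list, tags)
def recover_data (txt_list : List String) (tag_list : List String) : List (List String) :=
  (List.foldl
    (fun (st : List (List String) × List String) (p : String × String) =>
      if p.1 = "[line]" then (st.1 ++ [st.2 ++ ["O"]], ([] : List String))
      else (st.1, st.2 ++ [p.2]))
    ([], []) (txt_list.zip tag_list)).1

-- ===== PORT B =====
-- the while loop of Source B: '[line]' in txt → membership test; txt.index('[line]') → idxOf
-- (equal to Python's .index when the element is present); slices [:b], [b+1:] → take/drop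
def recoverLoop (txt tags : List String) (out : List (List String)) : List (List String) :=
  if "[line]" ∈ txt then
    let b := txt.idxOf "[line]"
    recoverLoop (txt.drop (b + 1)) (tags.drop (b + 1)) (out ++ [tags.take b ++ ["O"]])
  else out
termination_by txt.length
decreasing_by
  have h0 : 0 < txt.length := List.length_pos_of_ne_nil (by rintro rfl; simp_all)
  simp only [List.length_drop]; omega

def recover_data_alt (txt_list : List String) (tag_list : List String) : List (List String) :=
  let n := min txt_list.length tag_list.length
  recoverLoop (txt_list.take n) (tag_list.take n) []

-- ===== PRECONDITION & SPEC =====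
def Spec_recover_data (txt_list : List String) (tag_list : List String) (out : List (List String)) : Prop := out = recover_data_alt txt_list tag_list
instance (txt_list : List String) (tag_list : List String) (out : List (List String)) : Decidable (Spec_recover_data txt_list tag_list out) := by unfold Spec_recover_data; infer_instance

-- ===== CLAIM (what is proved, stated in full; the proofs are below) =====
def Claim_equal_recover_data : Prop := ∀ (txt_list : List String) (tag_list : List String), Dom_recover_data txt_list tag_list → Spec_recover_data txt_list tag_list (recover_data txt_list tag_list)

-- ===== LEMMAS AND PROOFS =====

-- common recursive characterisation: current segment `cur`, remaining zipped pairs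
def goRD (cur : List String) : List (String × String) → List (List String)
  | [] => []
  | (t, g) :: rest => if t = "[line]" then (cur ++ ["O"]) :: goRD [] rest else goRD (cur ++ [g]) rest

theorem foldA_eq_goRD (l : List (String × String)) (acc : List (List String)) (cur : List String) :
    (List.foldl
      (fun (st : List (List String) × List String) (p : String × String) =>
        if p.1 = "[line]" then (st.1 ++ [st.2 ++ ["O"]], ([] : List String))
        else (st.1, st.2 ++ [p.2]))
      (acc, cur) l).1 = acc ++ goRD cur l := by
  induction l generalizing acc cur with
  | nil => simp [goRD]
  | cons p rest ih =>
    obtain ⟨t, g⟩ := p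
    by_cases h : t = "[line]" <;> simp [goRD, h, ih]

theorem goRD_no_marker (l : List (String × String)) (cur : List String)
    (h : ∀ p ∈ l, p.1 ≠ "[line]") : goRD cur l = [] := by
  induction l generalizing cur with
  | nil => rfl
  | cons p rest ih =>
    obtain ⟨t, g⟩ := p
    have ht : t ≠ "[line]" := h (t, g) (by simp)
    simp only [goRD, if_neg ht]
    exact ih _ fun q hq => h q (by simp [hq])

theorem goRD_marker (l₁ l₂ : List (String × String)) (g : String) (cur : List String)
    (h : ∀ p ∈ l₁, p.1 ≠ "[line]") :
    goRD cur (l₁ ++ ("[line]", g) :: l₂)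
      = (cur ++ l₁.map Prod.snd ++ ["O"]) :: goRD [] l₂ := by
  induction l₁ generalizing cur with
  | nil => simp [goRD]
  | cons p rest ih =>
    obtain ⟨t, g'⟩ := p
    have ht : t ≠ "[line]" := h (t, g') (by simp)
    simp only [List.cons_append, goRD, if_neg ht]
    rw [ih _ fun q hq => h q (by simp [hq])]
    simp

theorem not_mem_take_idxOf {α : Type} [DecidableEq α] (a : α) (l : List α) :
    a ∉ l.take (l.idxOf a) := by
  induction l with
  | nil => simp
  | cons x xs ih =>
    by_cases h : x = a
    · simp [h, List.idxOf_cons_self]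
    · have : (x :: xs).idxOf a = xs.idxOf a + 1 := by
        simp [h]
      rw [this, List.take_succ_cons]
      simp only [List.mem_cons, not_or]
      exact ⟨fun hh => h hh.symm, ih⟩

theorem recoverLoop_eq_goRD (txt tags : List String) (out : List (List String))
    (hlen : txt.length = tags.length) :
    recoverLoop txt tags out = out ++ goRD [] (txt.zip tags) := by
  by_cases hm : "[line]" ∈ txt
  · have hb : txt.idxOf "[line]" < txt.length := List.idxOf_lt_length_of_mem hm
    set b := txt.idxOf "[line]" with hbdef
    have hbt : b < tags.length := hlen ▸ hb
    -- decompose both lists at index b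
    have htxt : txt = txt.take b ++ "[line]" :: txt.drop (b + 1) := by
      conv_lhs => rw [← List.take_append_drop b txt]
      rw [List.drop_eq_getElem_cons hb]
      simp [hbdef, List.getElem_idxOf hb]
    have htags : tags = tags.take b ++ tags[b] :: tags.drop (b + 1) := by
      conv_lhs => rw [← List.take_append_drop b tags]
      rw [List.drop_eq_getElem_cons hbt]
    have hlt : (txt.take b).length = b := by simp [Nat.le_of_lt hb]
    have hlg : (tags.take b).length = b := by simp [Nat.le_of_lt hbt]
    have hzip : txt.zip tags
        = (txt.take b).zip (tags.take b)
          ++ ("[line]", tags[b]) :: (txt.drop (b + 1)).zip (tags.drop (b + 1)) := by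
      conv_lhs => rw [htxt, htags]
      rw [List.zip_append (by rw [hlt, hlg])]
      rfl
    have hnom : ∀ p ∈ (txt.take b).zip (tags.take b), p.1 ≠ "[line]" := by
      rintro ⟨t, g⟩ hp rfl
      exact not_mem_take_idxOf "[line]" txt (List.of_mem_zip hp).1
    have hmap : ((txt.take b).zip (tags.take b)).map Prod.snd = tags.take b :=
      List.map_snd_zip (by rw [hlt, hlg])
    rw [recoverLoop.eq_def]
    simp only [if_pos hm]
    rw [recoverLoop_eq_goRD _ _ _ (by simp [hlen])]
    rw [hzip, goRD_marker _ _ _ _ hnom, hmap]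
    simp [← hbdef]
  · rw [recoverLoop.eq_def]
    simp only [if_neg hm]
    rw [goRD_no_marker]
    · simp
    · rintro ⟨t, g⟩ hp rfl
      exact hm (List.of_mem_zip hp).1
termination_by txt.length
decreasing_by
  have h0 := List.length_pos_of_ne_nil (List.ne_nil_of_mem hm)
  simp only [List.length_drop]
  omega

-- ===== VERDICT (by name: the statement is the Claim_ definition above) =====
theorem recover_data_spec : Claim_equal_recover_data := by
  intro txt tags _
  unfold Spec_recover_data recover_data recover_data_alt
  rw [foldA_eq_goRD]
  rw [recoverLoop_eq_goRD _ _ _ (by simp)]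
  have hz : (txt.take (min txt.length tags.length)).zip (tags.take (min txt.length tags.length))
      = txt.zip tags := by
    have := List.take_zipWith (f := Prod.mk (α := String) (β := String))
      (l := txt) (l' := tags) (i := min txt.length tags.length)
    simp only [List.zip] at *
    rw [← this, List.take_of_length_le (by simp)]
  rw [hz]
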